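-- pv_equiv track=rewrite | github.com/Felix-012/ontology-concept-distillation | knowledge_graph/ner.py | _negation_tool
-- ===== SOURCE A (Python) =====
-- def _negation_tool(note: str) -> str:
--     """
--     Determine whether the given note indicates presence, uncertainty, or absence.
--     Expects note to be a short string (more than 3 words).
--     Returns one of: "present", "uncertain", "absent".
--     """
--     words = note.lower().split()
--
--     # Define your trigger keywords (customize these lists as needed)
--     ABSENCE_KEYWORDS = {"no", "not", "none", "without", "absent"}
--     UNCERTAIN_KEYWORDS = {"maybe", "possible", "unclear", "could", "might", "suspect"}
--
--     # If any uncertainty cue appears, mark as uncertain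
--     for kw in UNCERTAIN_KEYWORDS:
--         if kw in words:
--             return "uncertain"
--
--     # If any negation / absence cue appears, mark as absent
--     for kw in ABSENCE_KEYWORDS:
--         if kw in words:
--             return "absent"
--
--     # Default to present
--     return "present"
-- ===== SOURCE B (Python) =====
-- def _negation_tool(note: str) -> str:
--     found_uncertain = False
--     found_absent = False
--     for w in note.lower().split():
--         if w in {"maybe", "possible", "unclear", "could", "might", "suspect"}:
--             found_uncertain = True
--         elif w in {"no", "not", "none", "without", "absent"}:
--             found_absent = True
--     if found_uncertain:
--         return "uncertain"
--     if found_absent: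
--         return "absent"
--     return "present"
-- ===== Notes on version B (the rewrite author's own statement) =====
-- stated objective: alternative
-- what changed: One pass over the note's words maintaining two boolean flags (word-side scan) instead of two early-return membership scans over the keyword sets.
import Mathlib
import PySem

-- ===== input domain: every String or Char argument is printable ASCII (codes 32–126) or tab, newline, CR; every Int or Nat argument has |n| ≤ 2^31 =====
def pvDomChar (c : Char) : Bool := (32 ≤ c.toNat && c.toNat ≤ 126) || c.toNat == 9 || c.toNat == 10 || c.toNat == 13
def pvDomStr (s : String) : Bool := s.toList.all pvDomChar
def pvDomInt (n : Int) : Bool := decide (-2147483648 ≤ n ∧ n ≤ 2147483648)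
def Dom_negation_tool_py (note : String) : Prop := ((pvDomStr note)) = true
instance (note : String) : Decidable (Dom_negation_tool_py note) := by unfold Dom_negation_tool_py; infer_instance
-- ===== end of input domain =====

-- B maintains two flags in one pass over the words instead of A's two early-return scans over the keyword sets; alternative decomposition, same cost class.

-- ===== PORT A =====
-- A's keyword sets (Python set literals; iteration order does not affect A's result, ported in literal order)
def pvAbsenceKw : List String := ["no", "not", "none", "without", "absent"]
def pvUncertainKw : List String := ["maybe", "possible", "unclear", "could", "might", "suspect"]

-- 'for kw in KWS: if kw in words: return <r>' as a structural recursion over the keyword list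
def pvScanKw (kws : List String) (words : List String) : Bool :=
  match kws with
  | [] => false
  | kw :: rest => if words.contains kw then true else pvScanKw rest words

def negation_tool_py (note : String) : String :=
  let words := PySem.Str.split₀ (PySem.Str.lower note)
  if pvScanKw pvUncertainKw words then "uncertain"
  else if pvScanKw pvAbsenceKw words then "absent"
  else "present"

-- ===== PORT B =====
-- one fold over the words, accumulating (found_uncertain, found_absent)
def pvStep (acc : Bool × Bool) (w : String) : Bool × Bool :=
  if pvUncertainKw.contains w then (true, acc.2)
  else if pvAbsenceKw.contains w then (acc.1, true)
  else acc

def negation_tool_py_alt (note : String) : String :=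
  let flags := (PySem.Str.split₀ (PySem.Str.lower note)).foldl pvStep (false, false)
  if flags.1 then "uncertain"
  else if flags.2 then "absent"
  else "present"

-- ===== PRECONDITION & SPEC =====
def Spec_negation_tool_py (note : String) (out : String) : Prop := out = negation_tool_py_alt note
instance (note : String) (out : String) : Decidable (Spec_negation_tool_py note out) := by unfold Spec_negation_tool_py; infer_instance

-- ===== CLAIM (what is proved, stated in full; the proofs are below) =====
def Claim_equal_negation_tool_py : Prop := ∀ (note : String), Dom_negation_tool_py note → Spec_negation_tool_py note (negation_tool_py note)

-- ===== LEMMAS AND PROOFS =====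

-- A's keyword scan is 'some keyword occurs among the words'
theorem pvScanKw_eq_any (kws words : List String) :
    pvScanKw kws words = kws.any (fun kw => words.contains kw) := by
  induction kws with
  | nil => rfl
  | cons kw rest ih =>
    rw [pvScanKw, List.any_cons, ih]
    cases words.contains kw <;> simp

-- scanning the keywords against the words = scanning the words against the keywords
theorem pv_any_comm (kws words : List String) :
    kws.any (fun kw => words.contains kw) = words.any (fun w => kws.contains w) := by
  rw [Bool.eq_iff_iff]
  simp only [List.any_eq_true, List.contains_iff_mem]
  exact ⟨fun ⟨kw, h1, h2⟩ => ⟨kw, by simpa using h2, by simpa using h1⟩,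
         fun ⟨w, h1, h2⟩ => ⟨w, by simpa using h2, by simpa using h1⟩⟩

-- B's fold computes the two flags
theorem pvFold_flags (words : List String) (u a : Bool) :
    words.foldl pvStep (u, a) =
      (u || words.any (fun w => pvUncertainKw.contains w),
       a || words.any (fun w => pvAbsenceKw.contains w && !pvUncertainKw.contains w)) := by
  induction words generalizing u a with
  | nil => simp
  | cons w ws ih =>
    rw [List.foldl_cons, ih, List.any_cons, List.any_cons]
    cases hU : pvUncertainKw.contains w <;> cases hA : pvAbsenceKw.contains w <;>
      simp only [pvStep, hU, hA, Bool.false_eq_true, Bool.not_true, Bool.not_false,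
        Bool.true_and, Bool.false_and, Bool.true_or, Bool.false_or, Bool.or_assoc,
        if_true, if_false, Prod.mk.injEq, and_self, eq_self_iff_true] <;>
      simp

-- once no word is uncertain, the guarded absence flag equals the plain one
theorem pv_any_and_not (ws : List String)
    (h : ws.any (fun w => pvUncertainKw.contains w) = false) :
    ws.any (fun w => pvAbsenceKw.contains w && !pvUncertainKw.contains w)
      = ws.any (fun w => pvAbsenceKw.contains w) := by
  induction ws with
  | nil => rfl
  | cons w ws ih =>
    rw [List.any_cons] at h ⊢
    rw [List.any_cons]
    rcases Bool.or_eq_false_iff.mp h with ⟨h1, h2⟩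
    rw [ih h2, h1]
    cases pvAbsenceKw.contains w <;> rfl

-- ===== VERDICT (by name: the statement is the Claim_ definition above) =====
theorem negation_tool_py_spec : Claim_equal_negation_tool_py := by
  intro note _
  simp only [Spec_negation_tool_py, negation_tool_py, negation_tool_py_alt]
  rw [pvScanKw_eq_any, pvScanKw_eq_any, pvFold_flags,
      pv_any_comm pvUncertainKw, pv_any_comm pvAbsenceKw]
  generalize PySem.Str.split₀ (PySem.Str.lower note) = ws
  cases hu : ws.any (fun w => pvUncertainKw.contains w) with
  | true => rfl
  | false => rw [pv_any_and_not ws hu]; rfl
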